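-- pv_equiv track=rewrite | github.com/jamesrahenry/Rosetta_Analysis | gem/ablate_behavioral_pilot.py | select_control_layer
-- ===== SOURCE A (Python) =====
-- def select_control_layer(caz_layers: set[int], n_layers: int) -> int:
--     """Non-CAZ layer closest to the model midpoint."""
--     midpoint = n_layers // 2
--     for delta in range(0, n_layers):
--         for sign in ([0] if delta == 0 else [1, -1]):
--             candidate = midpoint + sign * delta
--             if 0 <= candidate < n_layers and candidate not in caz_layers:
--                 return candidate
--     return midpoint  # fallback
-- ===== SOURCE B (Python) =====
-- def select_control_layer(caz_layers, n_layers):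
--     """Non-CAZ layer closest to the model midpoint (two directed scans)."""
--     mid = n_layers // 2
--     u = mid
--     while u < n_layers and u in caz_layers:
--         u += 1
--     l = mid - 1
--     while l >= 0 and l in caz_layers:
--         l -= 1
--     has_u = u < n_layers
--     has_l = l >= 0
--     if has_u and has_l:
--         return u if u - mid <= mid - l else l
--     if has_u:
--         return u
--     if has_l:
--         return l
--     return mid  # every layer is a CAZ layer (or no layers)
-- ===== Notes on version B (the rewrite author's own statement) =====
-- stated objective: alternative
-- what changed: Replaces A's outward delta loop (midpoint, then midpoint±delta with upper-first tie-break) by two directed scans — the nearest free layer at or above the midpoint and the nearest free layer below it — followed by a single distance comparison that prefers the upper side on ties.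
import Mathlib
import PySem

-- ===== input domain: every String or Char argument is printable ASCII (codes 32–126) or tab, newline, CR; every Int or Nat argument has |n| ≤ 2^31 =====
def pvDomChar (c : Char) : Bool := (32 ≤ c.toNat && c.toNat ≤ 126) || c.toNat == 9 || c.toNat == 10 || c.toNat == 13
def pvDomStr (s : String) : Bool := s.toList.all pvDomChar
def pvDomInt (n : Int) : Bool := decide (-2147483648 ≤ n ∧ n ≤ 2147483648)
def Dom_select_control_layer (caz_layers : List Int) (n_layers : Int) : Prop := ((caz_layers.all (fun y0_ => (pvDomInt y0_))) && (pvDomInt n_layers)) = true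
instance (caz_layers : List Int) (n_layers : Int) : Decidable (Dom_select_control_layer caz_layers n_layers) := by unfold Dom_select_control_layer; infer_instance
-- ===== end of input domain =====

-- B replaces A's outward delta loop (midpoint, then ±delta) by two directed scans —
-- nearest free layer at/above the midpoint, nearest free layer below it — and a final
-- distance comparison (ties to the upper side); objective: alternative algorithm.

-- ===== PORT A =====
-- for delta in range(0, n_layers): for sign in ([0] if delta == 0 else [1, -1]): …
-- fuel counts the remaining deltas of range(0, n_layers); `return` = stopping the recursion.
def aLoop (caz_layers : List Int) (n_layers mid : Int) : Nat → Int → Int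
  | 0, _ => mid  -- loop exhausted: `return midpoint  # fallback`
  | fuel + 1, delta =>
    if delta = 0 then
      -- sign list [0]: single candidate midpoint + 0
      if 0 ≤ mid ∧ mid < n_layers ∧ ¬ caz_layers.contains mid then mid
      else aLoop caz_layers n_layers mid fuel (delta + 1)
    else
      -- sign list [1, -1]: candidate mid + delta, then mid - delta
      if 0 ≤ mid + delta ∧ mid + delta < n_layers ∧ ¬ caz_layers.contains (mid + delta) then mid + delta
      else if 0 ≤ mid - delta ∧ mid - delta < n_layers ∧ ¬ caz_layers.contains (mid - delta) then mid - delta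
      else aLoop caz_layers n_layers mid fuel (delta + 1)

def select_control_layer (caz_layers : List Int) (n_layers : Int) : Int :=
  let mid := PySem.Int.floordiv n_layers 2
  aLoop caz_layers n_layers mid n_layers.toNat 0

-- ===== PORT B =====
-- while u < n_layers and u in caz_layers: u += 1   (some u if still in range, else None)
def upScan (caz_layers : List Int) (n_layers : Int) : Nat → Int → Option Int
  | 0, _ => none
  | fuel + 1, u =>
    if u < n_layers then
      (if caz_layers.contains u then upScan caz_layers n_layers fuel (u + 1) else some u)
    else none

-- while l >= 0 and l in caz_layers: l -= 1   (some l if still ≥ 0, else None)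
def downScan (caz_layers : List Int) : Nat → Int → Option Int
  | 0, _ => none
  | fuel + 1, l =>
    if 0 ≤ l then
      (if caz_layers.contains l then downScan caz_layers fuel (l - 1) else some l)
    else none

-- the final if-cascade of Source B
def combine (mid : Int) : Option Int → Option Int → Int
  | some u, some l => if u - mid ≤ mid - l then u else l
  | some u, none => u
  | none, some l => l
  | none, none => mid

def select_control_layer_alt (caz_layers : List Int) (n_layers : Int) : Int :=
  let mid := PySem.Int.floordiv n_layers 2
  combine mid
    (upScan caz_layers n_layers (n_layers - mid).toNat mid)
    (downScan caz_layers mid.toNat (mid - 1))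

-- ===== PRECONDITION & SPEC =====
def Spec_select_control_layer (caz_layers : List Int) (n_layers : Int) (out : Int) : Prop := out = select_control_layer_alt caz_layers n_layers
instance (caz_layers : List Int) (n_layers : Int) (out : Int) : Decidable (Spec_select_control_layer caz_layers n_layers out) := by unfold Spec_select_control_layer; infer_instance

-- ===== CLAIM (what is proved, stated in full; the proofs are below) =====
def Claim_equal_select_control_layer : Prop := ∀ (caz_layers : List Int) (n_layers : Int), Dom_select_control_layer caz_layers n_layers → Spec_select_control_layer caz_layers n_layers (select_control_layer caz_layers n_layers)

-- ===== LEMMAS AND PROOFS =====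

theorem upScan_some_ge (caz : List Int) (n : Int) (fuel : Nat) (u v : Int)
    (h : upScan caz n fuel u = some v) : u ≤ v := by
  induction fuel generalizing u with
  | zero => simp [upScan] at h
  | succ f ih =>
    rw [upScan] at h
    by_cases h1 : u < n
    · rw [if_pos h1] at h
      by_cases h2 : caz.contains u = true
      · rw [if_pos h2] at h; have := ih _ h; omega
      · rw [if_neg h2] at h; simp at h; omega
    · rw [if_neg h1] at h; simp at h

theorem downScan_some_le (caz : List Int) (fuel : Nat) (l v : Int)
    (h : downScan caz fuel l = some v) : v ≤ l := by
  induction fuel generalizing l with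
  | zero => simp [downScan] at h
  | succ f ih =>
    rw [downScan] at h
    by_cases h1 : 0 ≤ l
    · rw [if_pos h1] at h
      by_cases h2 : caz.contains l = true
      · rw [if_pos h2] at h; have := ih _ h; omega
      · rw [if_neg h2] at h; simp at h; omega
    · rw [if_neg h1] at h; simp at h

-- Key invariant: from delta d ≥ 1 on, A's loop equals B's combined scans started at mid±d.
theorem key (caz : List Int) (n mid : Int) (hmid0 : 0 ≤ mid) (hmid1 : mid ≤ n - 1)
    (fuel : Nat) (d : Int) (hd : 1 ≤ d) (hfuel : (fuel : Int) = n - d) :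
    aLoop caz n mid fuel d =
      combine mid (upScan caz n (n - (mid + d)).toNat (mid + d))
        (downScan caz (mid - d + 1).toNat (mid - d)) := by
  induction fuel generalizing d with
  | zero =>
    have hdn : n ≤ d := by omega
    have h1 : (n - (mid + d)).toNat = 0 := by omega
    have h2 : (mid - d + 1).toNat = 0 := by omega
    simp [aLoop, h1, h2, upScan, downScan, combine]
  | succ f ih =>
    have hdne : ¬ d = 0 := by omega
    rw [aLoop]
    simp only [hdne, if_false]
    by_cases hup : 0 ≤ mid + d ∧ mid + d < n ∧ ¬ caz.contains (mid + d)
    · -- upper candidate is free: both sides return mid + d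
      rw [if_pos hup]
      have hfu : (n - (mid + d)).toNat = ((n - (mid + d + 1)).toNat) + 1 := by omega
      rw [hfu, upScan, if_pos hup.2.1]
      have : caz.contains (mid + d) = false := by
        cases h : caz.contains (mid + d) <;> simp_all <;> omega
      rw [this]
      simp only [Bool.false_eq_true, if_false]
      cases hL : downScan caz (mid - d + 1).toNat (mid - d) with
      | none => simp [combine]
      | some l =>
        have hl := downScan_some_le _ _ _ _ hL
        simp only [combine]
        rw [if_pos (by omega)]
    · rw [if_neg hup]
      -- upper candidate blocked: upScan skips it
      have hupeq : upScan caz n (n - (mid + d)).toNat (mid + d)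
          = upScan caz n (n - (mid + (d + 1))).toNat (mid + (d + 1)) := by
        by_cases hlt : mid + d < n
        · have hc : caz.contains (mid + d) = true := by
            cases h : caz.contains (mid + d) <;> simp_all <;> omega
          have hfu : (n - (mid + d)).toNat = ((n - (mid + (d + 1))).toNat) + 1 := by omega
          rw [hfu, upScan, if_pos hlt, hc]
          simp only [if_true]
          congr 1; omega
        · have h1 : (n - (mid + d)).toNat = 0 := by omega
          have h2 : (n - (mid + (d + 1))).toNat = 0 := by omega
          rw [h1, h2]; rfl
      by_cases hdown : 0 ≤ mid - d ∧ mid - d < n ∧ ¬ caz.contains (mid - d)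
      · -- lower candidate is free: both sides return mid - d
        rw [if_pos hdown]
        have hfl : (mid - d + 1).toNat = ((mid - d)).toNat + 1 := by omega
        have hc : caz.contains (mid - d) = false := by
          cases h : caz.contains (mid - d) <;> simp_all <;> omega
        rw [hfl, downScan, if_pos hdown.1, hc]
        simp only [Bool.false_eq_true, if_false]
        rw [hupeq]
        cases hU : upScan caz n (n - (mid + (d + 1))).toNat (mid + (d + 1)) with
        | none => simp [combine]
        | some u =>
          have hu := upScan_some_ge _ _ _ _ _ hU
          simp only [combine]
          rw [if_neg (by omega)]
      · -- both blocked: recurse, downScan skips the lower candidate too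
        rw [if_neg hdown]
        have hdowneq : downScan caz (mid - d + 1).toNat (mid - d)
            = downScan caz (mid - (d + 1) + 1).toNat (mid - (d + 1)) := by
          by_cases hge : 0 ≤ mid - d
          · have hc : caz.contains (mid - d) = true := by
              cases h : caz.contains (mid - d) <;> simp_all <;> omega
            have hfl : (mid - d + 1).toNat = ((mid - (d + 1) + 1)).toNat + 1 := by omega
            rw [hfl, downScan, if_pos hge, hc]
            simp only [if_true]
            congr 1; omega
          · have h1 : (mid - d + 1).toNat = 0 := by omega
            have h2 : (mid - (d + 1) + 1).toNat = 0 := by omega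
            rw [h1, h2]; rfl
        rw [hupeq, hdowneq]
        exact ih (d + 1) (by omega) (by omega)

-- ===== VERDICT (by name: the statement is the Claim_ definition above) =====
theorem select_control_layer_spec : Claim_equal_select_control_layer := by
  intro caz n _
  unfold Spec_select_control_layer select_control_layer select_control_layer_alt
  show aLoop caz n (PySem.Int.floordiv n 2) n.toNat 0 =
    combine (PySem.Int.floordiv n 2)
      (upScan caz n (n - PySem.Int.floordiv n 2).toNat (PySem.Int.floordiv n 2))
      (downScan caz (PySem.Int.floordiv n 2).toNat (PySem.Int.floordiv n 2 - 1))
  have hdm := PySem.Int.floordiv_mul_add_mod n 2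
  have hm0 : 0 ≤ PySem.Int.mod n 2 := PySem.Int.mod_nonneg n (by omega)
  have hm1 : PySem.Int.mod n 2 < 2 := PySem.Int.mod_lt n (by omega)
  generalize hg : PySem.Int.floordiv n 2 = mid at hdm ⊢
  by_cases hn : 1 ≤ n
  · have hmb : 0 ≤ mid ∧ mid ≤ n - 1 := by omega
    have hnt : n.toNat = (n.toNat - 1) + 1 := by omega
    rw [hnt, aLoop, if_pos rfl]
    by_cases hfree : 0 ≤ mid ∧ mid < n ∧ ¬ caz.contains mid
    · rw [if_pos hfree]
      have hfu : (n - mid).toNat = ((n - (mid + 1)).toNat) + 1 := by omega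
      have hc : caz.contains mid = false := by
        cases h : caz.contains mid <;> simp_all
      rw [hfu, upScan, if_pos hfree.2.1, hc]
      simp only [Bool.false_eq_true, if_false]
      cases hL : downScan caz mid.toNat (mid - 1) with
      | none => simp [combine]
      | some l =>
        have hl := downScan_some_le _ _ _ _ hL
        simp only [combine]
        rw [if_pos (show mid - mid ≤ mid - l by omega)]
    · rw [if_neg hfree]
      have hc : caz.contains mid = true := by
        cases h : caz.contains mid <;> simp_all
      have hfu : (n - mid).toNat = ((n - (mid + 1)).toNat) + 1 := by omega
      rw [hfu, upScan, if_pos (show mid < n by omega), hc]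
      simp only [if_true, zero_add]
      have hk := key caz n mid hmb.1 hmb.2 (n.toNat - 1) 1 (by omega) (by omega)
      rw [hk]
      congr 2
      omega
  · have h0 : n.toNat = 0 := by omega
    have hmb : n ≤ mid ∧ mid ≤ 0 := by omega
    have h1 : (n - mid).toNat = 0 := by omega
    have h2 : mid.toNat = 0 := by omega
    rw [h0, h1, h2]
    rfl
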